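-- pv_equiv track=rewrite | github.com/chaney1475/Coding-Test | 백준/Silver/2512. 예산/예산.py | getBudget
-- ===== SOURCE A (Python) =====
-- def getBudget(lis, b):
--     lis.sort()
--     avr = b // len(lis)
--     if avr < lis[0]:
--         return avr
--     else:
--         sum = 0
--         for index, value in enumerate(lis):
--             sum += value
--             if sum + value * (len(lis) - index - 1) > b:
--                 return (b - sum + value) // (len(lis) - index)
--
--         return lis[-1]
-- ===== SOURCE B (Python) =====
-- def getBudget(lis, b):
--     lis.sort()
--     n = len(lis)
--     hi = lis[-1]
--     lo = min(b // n, hi)  # b//n is always affordable; the cap never needs to exceed the largest request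
--     while lo < hi:
--         mid = (lo + hi + 1) // 2
--         if sum(min(x, mid) for x in lis) <= b:
--             lo = mid
--         else:
--             hi = mid - 1
--     return lo
-- ===== Notes on version B (the rewrite author's own statement) =====
-- stated objective: alternative
-- what changed: Replaced A's enumerate prefix scan with its early-return closed-form division by a binary search on the cap value: repeatedly test a midpoint cap c by checking sum(min(x,c)) <= b and keep the largest affordable cap, starting from min(b//n, max(lis)).
-- outside the precondition, e.g. on getBudget([], 5): A raises ZeroDivisionError, B raises IndexError
import Mathlib
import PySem

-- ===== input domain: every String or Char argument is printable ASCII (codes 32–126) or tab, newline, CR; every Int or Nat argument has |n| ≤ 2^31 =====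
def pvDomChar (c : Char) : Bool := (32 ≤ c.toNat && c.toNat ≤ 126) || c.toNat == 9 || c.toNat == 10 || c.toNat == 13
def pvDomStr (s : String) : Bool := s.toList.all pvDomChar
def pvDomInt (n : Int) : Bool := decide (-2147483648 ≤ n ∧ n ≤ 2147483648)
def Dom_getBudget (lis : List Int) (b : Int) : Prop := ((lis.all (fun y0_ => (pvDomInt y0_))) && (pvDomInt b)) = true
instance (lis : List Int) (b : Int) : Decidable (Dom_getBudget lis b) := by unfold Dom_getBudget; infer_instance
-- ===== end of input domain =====

-- B replaces A's prefix scan by a binary search on the cap (largest cap c with sum(min(x,c)) ≤ b);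
-- objective: alternative algorithm, same results. Both A and B sort `lis` in place; the equivalence
-- proved here is about the return value (both perform the same mutation).

-- ===== PORT A =====
-- the for-loop over enumerate(lis) with early return, as structural recursion over the
-- remaining suffix, carrying the running index i and the running sum s
def getBudgetLoop (l0 : List Int) (n b : Int) : List Int → Int → Int → Int
  | [], _, _ => (PySem.List.pyGet? l0 (-1)).getD 0   -- lis[-1]; Pre_ guarantees l0 ≠ []
  | v :: rest, i, s =>
    if s + v + v * (n - i - 1) > b then PySem.Int.floordiv (b - (s + v) + v) (n - i)
    else getBudgetLoop l0 n b rest (i + 1) (s + v)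

def getBudget (lis : List Int) (b : Int) : Int :=
  let l := PySem.List.sorted lis (fun x => x)        -- lis.sort()
  let avr := PySem.Int.floordiv b (l.length : Int)   -- b // len(lis)
  if avr < (PySem.List.pyGet? l 0).getD 0 then avr   -- lis[0]; Pre_ guarantees l ≠ []
  else getBudgetLoop l (l.length : Int) b l 0 0

-- ===== PORT B =====
-- sum(min(x, c) for x in lis)
def sumMinB (l : List Int) (c : Int) : Int := (l.map (fun x => min x c)).sum

-- while lo < hi: mid = (lo+hi+1)//2; lo = mid if affordable else hi = mid-1
def bsLoop (l : List Int) (b lo hi : Int) : Int :=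
  if lo < hi then
    let mid := PySem.Int.floordiv (lo + hi + 1) 2
    if sumMinB l mid ≤ b then bsLoop l b mid hi else bsLoop l b lo (mid - 1)
  else lo
termination_by (hi - lo).toNat
decreasing_by
  · have h2 : PySem.Int.floordiv (lo + hi + 1) 2 = (lo + hi + 1) / 2 :=
      PySem.Int.floordiv_eq_ediv_of_pos (by omega)
    simp only [h2] at *; omega
  · have h2 : PySem.Int.floordiv (lo + hi + 1) 2 = (lo + hi + 1) / 2 :=
      PySem.Int.floordiv_eq_ediv_of_pos (by omega)
    simp only [h2] at *; omega

def getBudget_alt (lis : List Int) (b : Int) : Int :=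
  let l := PySem.List.sorted lis (fun x => x)                 -- lis.sort()
  let hi := (PySem.List.pyGet? l (-1)).getD 0                 -- lis[-1]; Pre_ guarantees l ≠ []
  let lo := min (PySem.Int.floordiv b (l.length : Int)) hi    -- min(b // n, hi)
  bsLoop l b lo hi

-- ===== PRECONDITION & SPEC =====
-- Pre_ excludes only the empty list, on which A raises ZeroDivisionError (b // len(lis)).
def Pre_getBudget (lis : List Int) (_b : Int) : Prop := lis ≠ []
instance (lis : List Int) (b : Int) : Decidable (Pre_getBudget lis b) := by
  unfold Pre_getBudget; infer_instance
def pvWitness_getBudget : List Int × Int := ([110, 30, 70], 150)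

def Spec_getBudget (lis : List Int) (b : Int) (out : Int) : Prop := out = getBudget_alt lis b
instance (lis : List Int) (b : Int) (out : Int) : Decidable (Spec_getBudget lis b out) := by
  unfold Spec_getBudget; infer_instance

-- ===== CLAIM (what is proved, stated in full; the proofs are below) =====
def Claim_equal_getBudget : Prop := ∀ (lis : List Int) (b : Int), Dom_getBudget lis b → Pre_getBudget lis b → Spec_getBudget lis b (getBudget lis b)

-- ===== LEMMAS AND PROOFS =====

-- min(x,·) summed is monotone in the cap
lemma sumMinB_mono (l : List Int) {c d : Int} (h : c ≤ d) : sumMinB l c ≤ sumMinB l d := by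
  induction l with
  | nil => simp [sumMinB]
  | cons x t ih =>
      simp only [sumMinB, List.map_cons, List.sum_cons] at *
      exact add_le_add (le_min (min_le_left _ _) (le_trans (min_le_right _ _) h)) ih

lemma sumMinB_le (l : List Int) (c : Int) : sumMinB l c ≤ c * (l.length : Int) := by
  induction l with
  | nil => simp [sumMinB]
  | cons x t ih =>
      simp only [sumMinB, List.map_cons, List.sum_cons, List.length_cons] at *
      have : min x c ≤ c := min_le_right _ _
      push_cast; nlinarith

-- if the cap separates p from t, the capped sum is prefix-sum + cap · (suffix length)
lemma sumMinB_split (p t : List Int) (c : Int) (hp : ∀ x ∈ p, x ≤ c) (ht : ∀ x ∈ t, c ≤ x) :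
    sumMinB (p ++ t) c = p.sum + c * (t.length : Int) := by
  induction p with
  | nil =>
      simp only [List.nil_append, List.sum_nil, zero_add]
      induction t with
      | nil => simp [sumMinB]
      | cons x r ih =>
          simp only [sumMinB, List.map_cons, List.sum_cons, List.length_cons] at *
          rw [min_eq_right (ht x (by simp)), ih (fun y hy => ht y (by simp [hy]))]
          push_cast; ring
  | cons x r ih =>
      simp only [sumMinB, List.cons_append, List.map_cons, List.sum_cons, List.sum_cons] at *
      rw [min_eq_left (hp x (by simp)), ih (fun y hy => hp y (by simp [hy]))]
      ring

-- in a ≤-sorted list every element is at most the last one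
lemma pairwise_le_getLast {l : List Int} (hp : l.Pairwise (· ≤ ·)) :
    ∀ (hl : l ≠ []) (x : Int), x ∈ l → x ≤ l.getLast hl := by
  induction hp with
  | nil => intro hl; simp at hl
  | @cons a t h ht ih =>
      intro hl x hx
      cases t with
      | nil => simp at hx ⊢; omega
      | cons c r =>
          rw [List.getLast_cons (by simp)]
          rcases List.mem_cons.mp hx with rfl | hx'
          · exact h _ (List.getLast_mem _)
          · exact ih (by simp) x hx'

-- characterisation of the binary search: it returns a feasible value r in [lo, hi]
-- with r = hi or cap r+1 unaffordable
lemma bsLoop_spec (l : List Int) (b : Int) :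
    ∀ (N : Nat) (lo hi : Int), (hi - lo).toNat ≤ N → sumMinB l lo ≤ b → lo ≤ hi →
      lo ≤ bsLoop l b lo hi ∧ bsLoop l b lo hi ≤ hi ∧ sumMinB l (bsLoop l b lo hi) ≤ b ∧
        (bsLoop l b lo hi = hi ∨ b < sumMinB l (bsLoop l b lo hi + 1)) := by
  intro N
  induction N with
  | zero =>
      intro lo hi hN hfeas hle
      rw [bsLoop, if_neg (by omega)]
      exact ⟨le_refl _, hle, hfeas, Or.inl (by omega)⟩
  | succ N ih =>
      intro lo hi hN hfeas hle
      rw [bsLoop]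
      by_cases hlt : lo < hi
      · have h2 : PySem.Int.floordiv (lo + hi + 1) 2 = (lo + hi + 1) / 2 :=
          PySem.Int.floordiv_eq_ediv_of_pos (by omega)
        simp only [hlt, if_true, h2]
        set mid := (lo + hi + 1) / 2 with hmid
        have hb : lo < mid ∧ mid ≤ hi := by omega
        by_cases hf : sumMinB l mid ≤ b
        · simp only [hf, if_true]
          have := ih mid hi (by omega) hf (by omega)
          exact ⟨by omega, this.2.1, this.2.2.1, this.2.2.2⟩
        · simp only [hf, if_false]
          have hrec := ih lo (mid - 1) (by omega) hfeas (by omega)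
          refine ⟨hrec.1, by omega, hrec.2.2.1, ?_⟩
          rcases hrec.2.2.2 with h | h
          · right
            have hone : mid - 1 + 1 = mid := by ring
            rw [h, hone]
            omega
          · right; exact h
      · rw [if_neg hlt]
        exact ⟨le_refl _, hle, hfeas, Or.inl (by omega)⟩

-- characterisation of A's prefix scan (same three properties, relative to the max element)
lemma getBudgetLoop_spec (l : List Int) (b : Int) (hl : l ≠ []) (hp : l.Pairwise (· ≤ ·)) :
    ∀ (t p : List Int), l = p ++ t →
      (p = [] ∨ p.sum + p.getLastD 0 * ((l.length : Int) - (p.length : Int)) ≤ b) →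
      (getBudgetLoop l (l.length : Int) b t (p.length : Int) p.sum ≤ l.getLast hl ∧
       sumMinB l (getBudgetLoop l (l.length : Int) b t (p.length : Int) p.sum) ≤ b ∧
       (getBudgetLoop l (l.length : Int) b t (p.length : Int) p.sum = l.getLast hl ∨
        b < sumMinB l (getBudgetLoop l (l.length : Int) b t (p.length : Int) p.sum + 1))) := by
  intro t
  induction t with
  | nil =>
      intro p hleq Hlow
      have hpl : p = l := by rw [hleq, List.append_nil]
      subst hpl
      have hres : getBudgetLoop p ((p.length : Int)) b [] (p.length : Int) p.sum
          = p.getLast hl := by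
        simp [getBudgetLoop, PySem.List.pyGet?_neg_one, List.getLast?_eq_some_getLast hl]
      rw [hres]
      have hsum : p.sum ≤ b := by
        rcases Hlow with h | h
        · exact absurd h hl
        · have : ((p.length : Int) - (p.length : Int)) = 0 := by ring
          rw [this, mul_zero, add_zero] at h
          exact h
      have hfeas : sumMinB p (p.getLast hl) ≤ b := by
        have := sumMinB_split p [] (p.getLast hl) (pairwise_le_getLast hp hl) (by simp)
        simp only [List.append_nil, List.length_nil, Nat.cast_zero, mul_zero, add_zero] at this
        omega
      exact ⟨le_refl _, hfeas, Or.inl rfl⟩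
  | cons v rest ih =>
      intro p hleq Hlow
      have hlen : l.length = p.length + rest.length + 1 := by
        rw [hleq]; simp; omega
      have hni : (l.length : Int) - (p.length : Int) = (rest.length : Int) + 1 := by
        rw [hlen]; push_cast; ring
      have hpos : (0 : Int) < (l.length : Int) - (p.length : Int) := by
        rw [hni]; positivity
      obtain ⟨hpp, hpt, hcross⟩ := List.pairwise_append.mp (hleq ▸ hp)
      have hvle : ∀ x ∈ v :: rest, v ≤ x := by
        intro x hx
        rcases List.mem_cons.mp hx with rfl | hx'
        · exact le_refl x
        · exact List.rel_of_pairwise_cons hpt hx'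
      have hvM : v ≤ l.getLast hl :=
        pairwise_le_getLast hp hl v (by rw [hleq]; simp)
      simp only [getBudgetLoop]
      by_cases hc : p.sum + v + v * ((l.length : Int) - (p.length : Int) - 1) > b
      · rw [if_pos hc]
        have harg : b - (p.sum + v) + v = b - p.sum := by ring
        rw [harg]
        set r := PySem.Int.floordiv (b - p.sum) ((l.length : Int) - (p.length : Int)) with hr
        have hrv : r < v := by
          rw [hr]
          rw [PySem.Int.floordiv_lt_iff_lt_mul hpos]
          have : v * ((l.length : Int) - (p.length : Int))
              = v * ((l.length : Int) - (p.length : Int) - 1) + v := by ring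
          omega
        have hple : ∀ x ∈ p, x ≤ r := by
          intro x hx
          have hpne : p ≠ [] := by rintro rfl; simp at hx
          rcases Hlow with h | h
          · exact absurd h hpne
          · rw [List.getLastD_eq_getLast?, List.getLast?_eq_some_getLast hpne, Option.getD_some] at h
            have hlast : p.getLast hpne ≤ r := by
              rw [hr, PySem.Int.le_floordiv_iff_mul_le hpos]
              omega
            exact le_trans (pairwise_le_getLast hpp hpne x hx) hlast
        have hfl := PySem.Int.floordiv_mul_add_mod (b - p.sum) ((l.length : Int) - (p.length : Int))
        have hm0 := PySem.Int.mod_nonneg (b - p.sum) hpos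
        have hmlt := PySem.Int.mod_lt (b - p.sum) hpos
        have hsplit : sumMinB l r = p.sum + r * ((l.length : Int) - (p.length : Int)) := by
          have h1 := sumMinB_split p (v :: rest) r hple
            (fun x hx => le_trans (le_of_lt hrv) (hvle x hx))
          rw [← hleq] at h1
          rw [h1, hni]; simp only [List.length_cons]; push_cast; ring
        have hsplit1 : sumMinB l (r + 1)
            = p.sum + (r + 1) * ((l.length : Int) - (p.length : Int)) := by
          have h1 := sumMinB_split p (v :: rest) (r + 1)
            (fun x hx => le_trans (hple x hx) (by omega))
            (fun x hx => le_trans (by omega) (hvle x hx))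
          rw [← hleq] at h1
          rw [h1, hni]; simp only [List.length_cons]; push_cast; ring
        refine ⟨by omega, ?_, Or.inr ?_⟩
        · rw [hsplit]; nlinarith [hfl, hm0]
        · rw [hsplit1]; nlinarith [hfl, hmlt]
      · rw [if_neg hc]
        rw [not_lt] at hc
        have hleq' : l = (p ++ [v]) ++ rest := by rw [hleq]; simp
        have Hlow' : (p ++ [v] = []) ∨ (p ++ [v]).sum + (p ++ [v]).getLastD 0
            * ((l.length : Int) - (((p ++ [v]).length : Nat) : Int)) ≤ b := by
          right
          rw [List.getLastD_concat]
          simp only [List.sum_append, List.sum_cons, List.sum_nil, add_zero,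
            List.length_append, List.length_cons, List.length_nil]
          push_cast
          linarith [hc]
        have hgoal := ih (p ++ [v]) hleq' Hlow'
        simp only [List.sum_append, List.sum_cons, List.sum_nil, add_zero,
          List.length_append, List.length_cons, List.length_nil] at hgoal
        push_cast at hgoal ⊢
        convert hgoal using 3
-- uniqueness: any two feasible values ≤ M, each maximal in the sense "= M or the next cap
-- is unaffordable", coincide
lemma cap_unique (l : List Int) (b M r₁ r₂ : Int)
    (h₁ : sumMinB l r₁ ≤ b) (h₂ : sumMinB l r₂ ≤ b) (hM₁ : r₁ ≤ M) (hM₂ : r₂ ≤ M)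
    (hx₁ : r₁ = M ∨ b < sumMinB l (r₁ + 1)) (hx₂ : r₂ = M ∨ b < sumMinB l (r₂ + 1)) :
    r₁ = r₂ := by
  rcases lt_trichotomy r₁ r₂ with h | h | h
  · rcases hx₁ with rfl | hx
    · omega
    · have := sumMinB_mono l (show r₁ + 1 ≤ r₂ by omega)
      omega
  · exact h
  · rcases hx₂ with rfl | hx
    · omega
    · have := sumMinB_mono l (show r₂ + 1 ≤ r₁ by omega)
      omega

-- ===== VERDICT (by name: the statement is the Claim_ definition above) =====
theorem getBudget_spec : Claim_equal_getBudget := by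
  intro lis b _ hpre
  unfold Spec_getBudget getBudget getBudget_alt
  set l := PySem.List.sorted lis (fun x => x) with hldef
  have hl : l ≠ [] := by
    rw [hldef, Ne, PySem.List.sorted_eq_nil_iff]; exact hpre
  have hp : l.Pairwise (· ≤ ·) := PySem.List.sorted_pairwise lis (fun x => x)
  have hn : (0 : Int) < (l.length : Int) := by
    have := List.length_pos_iff.mpr hl
    exact_mod_cast this
  obtain ⟨h0, t0, hcons⟩ := List.exists_cons_of_ne_nil hl
  have hhead : (PySem.List.pyGet? l 0).getD 0 = h0 := by
    rw [hcons]; simp [pysem]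
  have hlast : (PySem.List.pyGet? l (-1)).getD 0 = l.getLast hl := by
    rw [PySem.List.pyGet?_neg_one, List.getLast?_eq_some_getLast hl, Option.getD_some]
  set M := l.getLast hl with hM
  set avr := PySem.Int.floordiv b (l.length : Int) with havr
  have hfl := PySem.Int.floordiv_mul_add_mod b (l.length : Int)
  have hm0 := PySem.Int.mod_nonneg b hn
  have hmlt := PySem.Int.mod_lt b hn
  have hheadM : h0 ≤ M := pairwise_le_getLast hp hl h0 (by rw [hcons]; simp)
  have hheadle : ∀ x ∈ l, h0 ≤ x := by
    intro x hx
    rw [hcons] at hx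
    rcases List.mem_cons.mp hx with rfl | hx'
    · exact le_refl x
    · exact List.rel_of_pairwise_cons (hcons ▸ hp) hx'
  have hfeasAvr : sumMinB l avr ≤ b := by
    have h1 := sumMinB_le l avr
    nlinarith [hfl, hm0]
  -- properties of B's binary-search result
  have hlo : min avr M ≤ M := min_le_right _ _
  have hfeasLo : sumMinB l (min avr M) ≤ b :=
    le_trans (sumMinB_mono l (min_le_left _ _)) hfeasAvr
  obtain ⟨hb1, hb2, hb3, hb4⟩ :=
    bsLoop_spec l b (M - min avr M).toNat (min avr M) M (le_refl _) hfeasLo hlo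
  simp only [hlast, hhead]
  by_cases hcase : avr < h0
  · -- A returns avr
    rw [if_pos hcase]
    have hsplit1 : sumMinB l (avr + 1) = (avr + 1) * (l.length : Int) := by
      have := sumMinB_split [] l (avr + 1) (by simp)
        (fun x hx => le_trans (by omega) (hheadle x hx))
      simpa using this
    refine cap_unique l b M avr (bsLoop l b (min avr M) M) hfeasAvr hb3
      (by omega) hb2 (Or.inr ?_) hb4
    rw [hsplit1]; nlinarith [hfl, hmlt]
  · -- A runs the prefix scan
    rw [if_neg hcase]
    have hloop := getBudgetLoop_spec l b hl hp l [] (by simp) (Or.inl rfl)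
    simp only [List.length_nil, Nat.cast_zero, List.sum_nil] at hloop
    obtain ⟨ha1, ha2, ha3⟩ := hloop
    exact cap_unique l b M _ _ ha2 hb3 ha1 hb2 ha3 hb4
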